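-- pv_equiv track=rewrite | github.com/un-f0rgiven/python-project-50 | gendiff/scripts/make_diff.py | gen_diff
-- ===== SOURCE A (Python) =====
-- def gen_diff(data1, data2):
--     keys = data1.keys() | data2.keys()
--     result = {}
--     for key in keys:
--         if key not in data1:
--             result[key] = 'added'
--         elif key not in data2:
--             result[key] = 'deleted'
--         elif data1[key] == data2[key]:
--             result[key] = 'unchanged'
--         else:
--             result[key] = 'changed'
--     return result
-- ===== SOURCE B (Python) =====
-- def gen_diff(data1, data2):
--     OLD, NEW = 'old', 'new'
--     # Group: collect for every key the tagged values it has in either dict.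
--     records = {}
--     for key in data1:
--         records[key] = [(OLD, data1[key])]
--     for key in data2:
--         records.setdefault(key, []).append((NEW, data2[key]))
--
--     # Classify each key from the shape of its record alone.
--     def status(record):
--         if len(record) == 1:
--             tag, _value = record[0]
--             return 'deleted' if tag == OLD else 'added'
--         (_t1, old_value), (_t2, new_value) = record
--         return 'unchanged' if old_value == new_value else 'changed'
--
--     return {key: status(record) for key, record in records.items()}
-- ===== Notes on version B (the rewrite author's own statement) =====
-- stated objective: alternative
-- what changed: Instead of iterating the union of the key sets with a 4-way membership-test if/elif chain, B first GROUPS: it merges both dicts into per-key records of tagged values ([('old',v)] / [('new',v)] / both), then classifies every key purely from the shape of its record (length and tag), with no membership tests and no key-set union anywhere.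
import Mathlib
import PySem

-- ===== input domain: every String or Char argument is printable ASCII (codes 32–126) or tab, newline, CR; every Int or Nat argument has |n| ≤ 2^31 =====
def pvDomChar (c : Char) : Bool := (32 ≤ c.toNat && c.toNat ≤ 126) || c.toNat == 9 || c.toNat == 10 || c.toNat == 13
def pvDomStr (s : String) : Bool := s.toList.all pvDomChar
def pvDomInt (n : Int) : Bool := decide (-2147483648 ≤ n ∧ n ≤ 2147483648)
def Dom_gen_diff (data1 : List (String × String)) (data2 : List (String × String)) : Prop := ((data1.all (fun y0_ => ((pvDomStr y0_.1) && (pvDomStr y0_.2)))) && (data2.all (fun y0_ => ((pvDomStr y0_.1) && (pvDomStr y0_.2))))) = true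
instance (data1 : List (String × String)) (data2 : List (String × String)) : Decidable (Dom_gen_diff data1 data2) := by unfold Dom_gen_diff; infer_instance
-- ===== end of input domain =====

-- B replaces A's loop over the key-set union with its 4-way membership-test if/elif chain by a
-- group-then-classify pass: merge both dicts into per-key records of tagged values, then read
-- each status off the record's shape — no membership tests, no key-set union (alternative).

-- ===== PORT A =====
def gen_diff (data1 : List (String × String)) (data2 : List (String × String)) : List (String × String) :=
  let d1 : PySem.Dict String String := PySem.Dict.mk data1
  let d2 : PySem.Dict String String := PySem.Dict.mk data2
  -- keys = data1.keys() | data2.keys(): Python's hash iteration order over this set is not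
  -- modelled; the set is consumed into a dict (an order-insensitive output), built here in
  -- insertion-order union.
  let keys : PySem.Set String := PySem.Set.union (PySem.Set.ofList d1.keys) d2.keys
  let result := keys.foldl (fun (r : PySem.Dict String String) key =>
    if ¬ d1.contains key then r.insert key "added"
    else if ¬ d2.contains key then r.insert key "deleted"
    else if d1.get? key = d2.get? key then r.insert key "unchanged"
    else r.insert key "changed") PySem.Dict.empty
  result.items

-- ===== PORT B =====
def gen_diff_alt (data1 : List (String × String)) (data2 : List (String × String)) : List (String × String) :=
  let d1 : PySem.Dict String String := PySem.Dict.mk data1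
  let d2 : PySem.Dict String String := PySem.Dict.mk data2
  -- for key in data1: records[key] = [('old', data1[key])]  (key is present, so getD's default "" is never used)
  let records : PySem.Dict String (List (String × String)) :=
    d1.keys.foldl (fun r key => r.insert key [("old", d1.getD key "")]) PySem.Dict.empty
  -- for key in data2: records.setdefault(key, []).append(('new', data2[key]))
  -- = records[key] = records.get(key, []) + [('new', data2[key])], exactly Dict.modify
  let records := d2.keys.foldl
    (fun r key => r.modify key [] (fun rec => rec ++ [("new", d2.getD key "")])) records
  -- status(record): classify from the record's shape (its indices 0/1 are in range where read,
  -- records' values being nonempty; pyGetD's defaults are never used)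
  let status : List (String × String) → String := fun record =>
    if record.length = 1 then
      if (PySem.List.pyGetD record 0 ("", "")).1 = "old" then "deleted" else "added"
    else
      if (PySem.List.pyGetD record 0 ("", "")).2 = (PySem.List.pyGetD record 1 ("", "")).2
      then "unchanged" else "changed"
  -- {key: status(record) for key, record in records.items()}
  (records.items.foldl (fun (r : PySem.Dict String String) kv =>
    r.insert kv.1 (status kv.2)) PySem.Dict.empty).items

-- ===== PRECONDITION & SPEC =====
-- Pre_ excludes association lists with duplicate keys: A's arguments are Python dicts, whose
-- keys are unique, so a duplicate-key list represents no input of A at all.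
def Pre_gen_diff (data1 : List (String × String)) (data2 : List (String × String)) : Prop :=
  (data1.map Prod.fst).Nodup ∧ (data2.map Prod.fst).Nodup
instance (data1 : List (String × String)) (data2 : List (String × String)) : Decidable (Pre_gen_diff data1 data2) := by unfold Pre_gen_diff; infer_instance
def pvWitness_gen_diff : (List (String × String)) × (List (String × String)) :=
  ([("a", "1"), ("b", "2")], [("b", "3"), ("c", "4")])

def Spec_gen_diff (data1 : List (String × String)) (data2 : List (String × String)) (out : List (String × String)) : Prop := out = gen_diff_alt data1 data2
instance (data1 : List (String × String)) (data2 : List (String × String)) (out : List (String × String)) : Decidable (Spec_gen_diff data1 data2 out) := by unfold Spec_gen_diff; infer_instance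

-- ===== CLAIM (what is proved, stated in full; the proofs are below) =====
def Claim_equal_gen_diff : Prop := ∀ (data1 : List (String × String)) (data2 : List (String × String)), Dom_gen_diff data1 data2 → Pre_gen_diff data1 data2 → Spec_gen_diff data1 data2 (gen_diff data1 data2)

-- ===== LEMMAS AND PROOFS =====

-- A's 4-way label as a function of the key
def pvLbl (d1 d2 : PySem.Dict String String) (key : String) : String :=
  if ¬ d1.contains key then "added"
  else if ¬ d2.contains key then "deleted"
  else if d1.get? key = d2.get? key then "unchanged" else "changed"

-- B's status helper, under a name the proofs can use (identical to the port's local lambda)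
def pvStatus (record : List (String × String)) : String :=
  if record.length = 1 then
    if (PySem.List.pyGetD record 0 ("", "")).1 = "old" then "deleted" else "added"
  else
    if (PySem.List.pyGetD record 0 ("", "")).2 = (PySem.List.pyGetD record 1 ("", "")).2
    then "unchanged" else "changed"

-- the record B collects for a key, in closed form
def pvRec (d1 d2 : PySem.Dict String String) (data1 data2 : List (String × String)) (k : String) :
    List (String × String) :=
  (if k ∈ data1.map Prod.fst then [("old", d1.getD k "")] else [])
    ++ (if k ∈ data2.map Prod.fst then [("new", d2.getD k "")] else [])

-- A's fold inserts pairwise-distinct fresh keys, so it just appends labelled pairs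
theorem pvA_shape (data1 data2 : List (String × String)) :
    gen_diff data1 data2 =
      (PySem.Set.update (PySem.Set.ofList (data1.map Prod.fst)) (data2.map Prod.fst)).map
        (fun k => (k, pvLbl (PySem.Dict.mk data1) (PySem.Dict.mk data2) k)) := by
  show ((PySem.Set.union (PySem.Set.ofList (PySem.Dict.mk data1).keys) (PySem.Dict.mk data2).keys).foldl
      (fun (r : PySem.Dict String String) key =>
        if ¬ (PySem.Dict.mk data1).contains key then r.insert key "added"
        else if ¬ (PySem.Dict.mk data2).contains key then r.insert key "deleted"
        else if (PySem.Dict.mk data1).get? key = (PySem.Dict.mk data2).get? key then r.insert key "unchanged"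
        else r.insert key "changed") PySem.Dict.empty).items = _
  have hstep : (fun (r : PySem.Dict String String) key =>
        if ¬ (PySem.Dict.mk data1).contains key then r.insert key "added"
        else if ¬ (PySem.Dict.mk data2).contains key then r.insert key "deleted"
        else if (PySem.Dict.mk data1).get? key = (PySem.Dict.mk data2).get? key then r.insert key "unchanged"
        else r.insert key "changed")
      = (fun (r : PySem.Dict String String) key =>
          r.insert key (pvLbl (PySem.Dict.mk data1) (PySem.Dict.mk data2) key)) := by
    funext r key
    unfold pvLbl
    split_ifs <;> rfl
  rw [hstep]
  have hkeys : PySem.Set.union (PySem.Set.ofList (PySem.Dict.mk data1).keys) (PySem.Dict.mk data2).keys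
      = PySem.Set.update (PySem.Set.ofList (data1.map Prod.fst)) (data2.map Prod.fst) := rfl
  rw [hkeys]
  have hnd : (PySem.Set.update (PySem.Set.ofList (data1.map Prod.fst)) (data2.map Prod.fst)).Nodup :=
    PySem.Set.nodup_update _ _ (PySem.Set.nodup_ofList _)
  have := PySem.Dict.items_foldl_insert_fresh
    (l := PySem.Set.update (PySem.Set.ofList (data1.map Prod.fst)) (data2.map Prod.fst))
    (k := fun a => a)
    (v := fun a => pvLbl (PySem.Dict.mk data1) (PySem.Dict.mk data2) a)
    (d := PySem.Dict.empty)
    (fun a _ => PySem.Dict.contains_empty a)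
    (by simpa using hnd)
  simpa using this

-- filter-then-project over a keyed map of a Nodup list picks out at most the one entry at c
theorem pvFilter_single (g : String → String × String) (c : String) (l : List String)
    (hl : l.Nodup) :
    ((l.map (fun k => (k, g k))).filter (fun p => p.1 == c)).map Prod.snd
      = if c ∈ l then [g c] else [] := by
  induction l with
  | nil => simp
  | cons x l ih =>
    rcases List.nodup_cons.mp hl with ⟨hx, hl'⟩
    simp only [List.map_cons, List.filter_cons]
    by_cases hxc : x = c
    · subst hxc
      have : (l.map (fun k => (k, g k))).filter (fun p => p.1 == x) = [] := by
        rw [List.filter_eq_nil_iff]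
        intro p hp
        obtain ⟨k, hk, rfl⟩ := List.mem_map.mp hp
        simp only [beq_iff_eq]
        exact fun h => hx (h ▸ hk)
      simp [this]
    · have hne : ((x, g x).1 == c) = false := by simpa using hxc
      rw [hne]
      simp only [Bool.false_eq_true, if_false]
      rw [ih hl']
      have hcc : (c ∈ x :: l) ↔ (c ∈ l) := by
        constructor
        · intro h
          rcases List.mem_cons.mp h with h | h
          · exact absurd h.symm hxc
          · exact h
        · exact fun h => List.mem_cons_of_mem _ h
      by_cases hc : c ∈ l
      · rw [if_pos hc, if_pos (hcc.mpr hc)]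
      · rw [if_neg hc, if_neg (fun h => hc (hcc.mp h))]

-- the records dict after B's two grouping loops: keys, and the value at each key
theorem pvRecords_getD (data1 data2 : List (String × String))
    (h1 : (data1.map Prod.fst).Nodup) (h2 : (data2.map Prod.fst).Nodup) (c : String) :
    (((PySem.Dict.mk data2).keys.foldl
        (fun r key => r.modify key [] (fun rec => rec ++ [("new", (PySem.Dict.mk data2).getD key "")]))
        ((PySem.Dict.mk data1).keys.foldl
          (fun r key => r.insert key [("old", (PySem.Dict.mk data1).getD key "")])
          (PySem.Dict.empty : PySem.Dict String (List (String × String))))).getD c [])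
      = pvRec (PySem.Dict.mk data1) (PySem.Dict.mk data2) data1 data2 c := by
  set d1 : PySem.Dict String String := PySem.Dict.mk data1 with hd1
  set d2 : PySem.Dict String String := PySem.Dict.mk data2 with hd2
  set r1 : PySem.Dict String (List (String × String)) :=
    d1.keys.foldl (fun r key => r.insert key [("old", d1.getD key "")]) PySem.Dict.empty with hr1
  -- first loop: fresh distinct inserts over data1's keys
  have hK1 : d1.keys = data1.map Prod.fst := rfl
  have hitems1 : r1.items = (data1.map Prod.fst).map (fun k => (k, [("old", d1.getD k "")])) := by
    rw [hr1, hK1]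
    have := PySem.Dict.items_foldl_insert_fresh
      (l := data1.map Prod.fst) (k := fun a => a)
      (v := fun a => [("old", d1.getD a "")])
      (d := (PySem.Dict.empty : PySem.Dict String (List (String × String))))
      (fun a _ => PySem.Dict.contains_empty a) (by simpa using h1)
    simpa using this
  have hkeys1 : r1.keys = data1.map Prod.fst := by
    show r1.items.map Prod.fst = _
    rw [hitems1, List.map_map]
    simp [Function.comp]
  have hget1 : r1.getD c [] = if c ∈ data1.map Prod.fst then [("old", d1.getD c "")] else [] := by
    by_cases hc : c ∈ data1.map Prod.fst
    · rw [if_pos hc]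
      have hmem : (c, [("old", d1.getD c "")]) ∈ r1.items := by
        rw [hitems1]; exact List.mem_map.mpr ⟨c, hc, rfl⟩
      have hknd : r1.keys.Nodup := by rw [hkeys1]; exact h1
      exact PySem.Dict.getD_of_mem_items r1 hmem hknd []
    · rw [if_neg hc]
      apply PySem.Dict.getD_of_not_contains
      rw [PySem.Dict.contains_eq_decide_mem_keys, hkeys1]
      simpa using hc
  -- second loop: a modify-append fold, i.e. a grouping fold over keyed pairs
  have hfold : (PySem.Dict.mk data2).keys.foldl
      (fun r key => r.modify key [] (fun rec => rec ++ [("new", d2.getD key "")])) r1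
      = ((data2.map Prod.fst).map (fun k => (k, ("new", d2.getD k "")))).foldl
          (fun r p => r.modify p.1 [] (fun rec => rec ++ [p.2])) r1 := by
    rw [List.foldl_map]
    rfl
  rw [hfold, PySem.Dict.getD_foldl_modify_append, hget1,
      pvFilter_single (fun k => ("new", d2.getD k "")) c _ h2]
  rfl

theorem pvRecords_keys (data1 data2 : List (String × String)) :
    ((PySem.Dict.mk data2).keys.foldl
        (fun r key => r.modify key [] (fun rec => rec ++ [("new", (PySem.Dict.mk data2).getD key "")]))
        ((PySem.Dict.mk data1).keys.foldl
          (fun r key => r.insert key [("old", (PySem.Dict.mk data1).getD key "")])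
          (PySem.Dict.empty : PySem.Dict String (List (String × String))))).keys
      = PySem.Set.update (PySem.Set.ofList (data1.map Prod.fst)) (data2.map Prod.fst) := by
  rw [PySem.Dict.keys_foldl_modify, PySem.Dict.keys_foldl_insert]
  rfl

-- B's whole result in closed form
theorem pvB_shape (data1 data2 : List (String × String))
    (h1 : (data1.map Prod.fst).Nodup) (h2 : (data2.map Prod.fst).Nodup) :
    gen_diff_alt data1 data2 =
      (PySem.Set.update (PySem.Set.ofList (data1.map Prod.fst)) (data2.map Prod.fst)).map
        (fun k => (k, pvStatus (pvRec (PySem.Dict.mk data1) (PySem.Dict.mk data2) data1 data2 k))) := by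
  set d1 : PySem.Dict String String := PySem.Dict.mk data1 with hd1
  set d2 : PySem.Dict String String := PySem.Dict.mk data2 with hd2
  set recs : PySem.Dict String (List (String × String)) :=
    d2.keys.foldl (fun r key => r.modify key [] (fun rec => rec ++ [("new", d2.getD key "")]))
      (d1.keys.foldl (fun r key => r.insert key [("old", d1.getD key "")]) PySem.Dict.empty) with hrecs
  show (recs.items.foldl (fun (r : PySem.Dict String String) kv =>
      r.insert kv.1 (pvStatus kv.2)) PySem.Dict.empty).items = _
  set U : PySem.Set String :=
    PySem.Set.update (PySem.Set.ofList (data1.map Prod.fst)) (data2.map Prod.fst) with hU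
  have hkeys : recs.keys = U := pvRecords_keys data1 data2
  have hndU : U.Nodup := PySem.Set.nodup_update _ _ (PySem.Set.nodup_ofList _)
  have hnd : recs.keys.Nodup := hkeys ▸ hndU
  have hitems : recs.items = U.map (fun k => (k, recs.getD k [])) := by
    rw [PySem.Dict.items_eq_map_keys recs hnd ([] : List (String × String)), hkeys]
  have hfinal := PySem.Dict.items_foldl_insert_fresh
    (l := recs.items) (k := Prod.fst) (v := fun kv => pvStatus kv.2)
    (d := (PySem.Dict.empty : PySem.Dict String String))
    (fun a _ => PySem.Dict.contains_empty a.1) (by exact hnd)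
  rw [hfinal,
    show (PySem.Dict.empty : PySem.Dict String String).items = [] from rfl,
    List.nil_append, hitems, List.map_map]
  apply List.map_congr_left
  intro k hk
  show (k, pvStatus (recs.getD k [])) = (k, pvStatus (pvRec d1 d2 data1 data2 k))
  exact congrArg (fun v => (k, pvStatus v)) (pvRecords_getD data1 data2 h1 h2 k)

-- pointwise: A's label equals B's status of the collected record
theorem pvPointwise (data1 data2 : List (String × String)) (k : String)
    (hk : k ∈ data1.map Prod.fst ∨ k ∈ data2.map Prod.fst) :
    pvLbl (PySem.Dict.mk data1) (PySem.Dict.mk data2) k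
      = pvStatus (pvRec (PySem.Dict.mk data1) (PySem.Dict.mk data2) data1 data2 k) := by
  set d1 : PySem.Dict String String := PySem.Dict.mk data1 with hd1
  set d2 : PySem.Dict String String := PySem.Dict.mk data2 with hd2
  have hc1 : d1.contains k = decide (k ∈ data1.map Prod.fst) :=
    PySem.Dict.contains_eq_decide_mem_keys d1 k
  have hc2 : d2.contains k = decide (k ∈ data2.map Prod.fst) :=
    PySem.Dict.contains_eq_decide_mem_keys d2 k
  unfold pvLbl pvRec
  by_cases h1 : k ∈ data1.map Prod.fst
  · rw [if_neg (by simp [hc1, h1])]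
    by_cases h2 : k ∈ data2.map Prod.fst
    · rw [if_neg (by simp [hc2, h2])]
      simp only [h1, h2, if_true]
      -- get? = some getD on contained keys
      have hs1 : d1.get? k = some (d1.getD k "") := by
        have : (d1.get? k).isSome := by
          rw [← PySem.Dict.contains_eq_isSome_get?, hc1]; simpa using h1
        obtain ⟨a, ha⟩ := Option.isSome_iff_exists.mp this
        rw [ha]
        exact congrArg some (PySem.Dict.getD_of_get?_eq_some _ "" ha).symm
      have hs2 : d2.get? k = some (d2.getD k "") := by
        have : (d2.get? k).isSome := by
          rw [← PySem.Dict.contains_eq_isSome_get?, hc2]; simpa using h2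
        obtain ⟨a, ha⟩ := Option.isSome_iff_exists.mp this
        rw [ha]
        exact congrArg some (PySem.Dict.getD_of_get?_eq_some _ "" ha).symm
      rw [hs1, hs2]
      unfold pvStatus
      simp [PySem.List.pyGetD, PySem.List.pyGet?, PySem.List.pyIdx?]
    · rw [if_pos (by simp [hc2, h2])]
      simp only [h1, h2, if_true, if_false]
      unfold pvStatus
      simp [PySem.List.pyGetD, PySem.List.pyGet?, PySem.List.pyIdx?]
  · rw [if_pos (by simp [hc1, h1])]
    have h2 : k ∈ data2.map Prod.fst := hk.resolve_left h1
    simp only [h1, h2, if_true, if_false]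
    unfold pvStatus
    simp [PySem.List.pyGetD, PySem.List.pyGet?, PySem.List.pyIdx?]

-- membership in the union key list splits into the two key lists
theorem pvMem_update (data1 data2 : List (String × String)) (k : String)
    (hk : k ∈ PySem.Set.update (PySem.Set.ofList (data1.map Prod.fst)) (data2.map Prod.fst)) :
    k ∈ data1.map Prod.fst ∨ k ∈ data2.map Prod.fst := by
  rw [PySem.Set.update_eq_append_filter] at hk
  rcases List.mem_append.mp hk with h | h
  · exact Or.inl ((PySem.Set.mem_ofList _ _).mp h)
  · exact Or.inr ((PySem.Set.mem_ofList _ _).mp (List.mem_filter.mp h).1)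

theorem pvMain (data1 data2 : List (String × String))
    (h1 : (data1.map Prod.fst).Nodup) (h2 : (data2.map Prod.fst).Nodup) :
    gen_diff data1 data2 = gen_diff_alt data1 data2 := by
  rw [pvA_shape, pvB_shape data1 data2 h1 h2]
  apply List.map_congr_left
  intro k hk
  exact congrArg (fun v => (k, v)) (pvPointwise data1 data2 k (pvMem_update data1 data2 k hk))

-- ===== VERDICT (by name: the statement is the Claim_ definition above) =====
theorem gen_diff_spec : Claim_equal_gen_diff := by
  intro data1 data2 _ hpre
  exact pvMain data1 data2 hpre.1 hpre.2
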